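-- pv_equiv track=rewrite | github.com/sodabeans/Algorithm | Programmers/Level 3/49191.py | solution
-- ===== SOURCE A (Python) =====
-- def solution(n, results):
--     answer = 0
--     visited = [0] * n
--     graph = [[0] * n for _ in range(n)]
--     for a, b in results:
--         graph[a - 1][b - 1] = 1
--     for i in range(n):
--         for j in range(n):
--             for k in range(n):
--                 if graph[j][i] and graph[i][k]:
--                     graph[j][k] = 1
--     visited = [0] * n
--     for i in range(n):
--         for j in range(n):
--             if graph[i][j]:
--                 visited[i] += 1
--             if graph[j][i]:
--                 visited[i] += 1
--     return visited.count(n - 1)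
-- ===== SOURCE B (Python) =====
-- def solution(n, results):
--     """Count the players whose ranking is fully determined: those who, through
--     chains of results, win against or lose to every other player."""
--     wins = [[] for _ in range(n)]
--     losses = [[] for _ in range(n)]
--     for a, b in results:
--         wins[a - 1].append(b - 1)
--         losses[b - 1].append(a - 1)
--
--     def count_reachable(i, adj):
--         seen = [False] * n
--         stack = list(adj[i])
--         while stack:
--             v = stack.pop()
--             if not seen[v]:
--                 seen[v] = True
--                 stack.extend(adj[v])
--         return sum(seen)
--
--     return sum(1 for i in range(n)
--                if count_reachable(i, wins) + count_reachable(i, losses) == n - 1)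
-- ===== Notes on version B (the rewrite author's own statement) =====
-- stated objective: faster
-- what changed: Replaces the in-place O(n^3) Floyd-Warshall adjacency-matrix closure with a per-player depth-first search over forward and reverse adjacency lists, counting players whose out- plus in-reachable sets cover the other n-1 players.
import Mathlib
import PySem

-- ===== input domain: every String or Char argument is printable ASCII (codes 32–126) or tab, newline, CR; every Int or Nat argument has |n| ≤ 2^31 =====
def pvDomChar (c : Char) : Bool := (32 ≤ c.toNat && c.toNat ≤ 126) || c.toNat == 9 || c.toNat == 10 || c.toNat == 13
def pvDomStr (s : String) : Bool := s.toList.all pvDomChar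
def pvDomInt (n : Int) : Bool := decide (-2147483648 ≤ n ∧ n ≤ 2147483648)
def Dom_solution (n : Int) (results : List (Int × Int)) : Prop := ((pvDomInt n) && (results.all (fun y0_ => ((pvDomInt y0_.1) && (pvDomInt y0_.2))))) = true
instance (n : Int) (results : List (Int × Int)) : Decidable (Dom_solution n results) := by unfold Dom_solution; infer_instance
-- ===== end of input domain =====

-- B replaces A's O(n^3) in-place Floyd-Warshall matrix closure by a per-player
-- depth-first search over forward/reverse adjacency lists (objective: faster).

-- ===== PORT A =====
-- In-place Floyd-Warshall on an n x n 0/1 adjacency matrix, then degree counting (port of A).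
-- graph[i][j] read, and 'graph[i][j] = 1' write (Python list-of-lists indexing,
-- including Python's negative-index wraparound; exact on the indices Pre_solution admits)
def cellA (g : List (List Int)) (i j : Int) : Int :=
  PySem.List.pyGetD (PySem.List.pyGetD g i []) j 0

def setA (g : List (List Int)) (i j : Int) : List (List Int) :=
  PySem.List.pySetD g i (PySem.List.pySetD (PySem.List.pyGetD g i []) j 1)

-- the innermost 'for k' loop of the Floyd-Warshall triple loop
def fwInner (N i j : Nat) (g : List (List Int)) : List (List Int) :=
  (List.range N).foldl (fun g (k : Nat) =>
    if cellA g (j : Int) (i : Int) ≠ 0 ∧ cellA g (i : Int) (k : Int) ≠ 0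
    then setA g (j : Int) (k : Int) else g) g

-- the middle 'for j' loop
def fwRound (N i : Nat) (g : List (List Int)) : List (List Int) :=
  (List.range N).foldl (fun g (j : Nat) => fwInner N i j g) g

-- the outer 'for i' loop
def fwAll (N : Nat) (g : List (List Int)) : List (List Int) :=
  (List.range N).foldl (fun g (i : Nat) => fwRound N i g) g

-- the inner 'for j' loop of the visited-accumulation pass
def visInner (N : Nat) (g : List (List Int)) (i : Nat) (vis : List Int) : List Int :=
  (List.range N).foldl (fun vis (j : Nat) =>
    let vis := if cellA g (i : Int) (j : Int) ≠ 0 then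
        PySem.List.pySetD vis (i : Int) (PySem.List.pyGetD vis (i : Int) 0 + 1) else vis
    if cellA g (j : Int) (i : Int) ≠ 0 then
        PySem.List.pySetD vis (i : Int) (PySem.List.pyGetD vis (i : Int) 0 + 1) else vis) vis

def solution (n : Int) (results : List (Int × Int)) : Int :=
  let N : Nat := n.toNat
  let graph : List (List Int) := (List.range N).map (fun _ => List.replicate N 0)
  let graph := results.foldl (fun g ab => setA g (ab.1 - 1) (ab.2 - 1)) graph
  let graph := fwAll N graph
  let visited : List Int := List.replicate N 0
  let visited := (List.range N).foldl (fun vis (i : Nat) => visInner N graph i vis) visited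
  ((visited.count (n - 1) : Nat) : Int)

-- ===== PORT B =====
-- Forward/reverse adjacency lists indexed by player (Python list indexing,
-- including negative-index wraparound), then a depth-first search with an
-- explicit stack from each player (port of B).
-- wins[i].append(x) / losses[i].append(x)
def adjAppend (g : List (List Int)) (i x : Int) : List (List Int) :=
  PySem.List.pySetD g i (PySem.List.pyGetD g i [] ++ [x])

-- the 'while stack' DFS loop: v = stack.pop(); if not seen[v]: seen[v] = True;
-- stack.extend(adj[v]).  The fuel argument is only a totality guard; it is
-- chosen large enough that the loop always reaches its natural exit.
def dfsLoop (adj : List (List Int)) : Nat → List Bool → List Int → List Bool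
  | 0, seen, _ => seen
  | _ + 1, seen, [] => seen
  | f + 1, seen, stack =>
      let v := stack.getLastD 0
      let rest := stack.dropLast
      if PySem.List.pyGetD seen v false = false then
        dfsLoop adj f (PySem.List.pySetD seen v true) (rest ++ PySem.List.pyGetD adj v [])
      else
        dfsLoop adj f seen rest

-- count_reachable(i, adj): run the DFS, then sum(seen)
def countReach (n : Int) (adj : List (List Int)) (i : Int) : Int :=
  let seen : List Bool := List.replicate n.toNat false
  let fuel : Nat := 2 * (adj.map List.length).sum + 1
  let seen := dfsLoop adj fuel seen (PySem.List.pyGetD adj i [])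
  ((seen.count true : Nat) : Int)

def solution_alt (n : Int) (results : List (Int × Int)) : Int :=
  let N : Nat := n.toNat
  let init : List (List Int) := (List.range N).map (fun _ => [])
  let wl := results.foldl (fun wl (ab : Int × Int) =>
      (adjAppend wl.1 (ab.1 - 1) (ab.2 - 1), adjAppend wl.2 (ab.2 - 1) (ab.1 - 1)))
    (init, init)
  (List.range N).foldl (fun answer (i : Nat) =>
    if countReach n wl.1 (i : Int) + countReach n wl.2 (i : Int) = n - 1
    then answer + 1 else answer) 0

-- ===== PRECONDITION & SPEC =====
-- Exactly the inputs on which A (and B) return: every pair component in [1-n, n]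
-- (outside that range Python list indexing raises IndexError in both).
def Pre_solution (n : Int) (results : List (Int × Int)) : Prop :=
  ∀ p ∈ results, 1 - n ≤ p.1 ∧ p.1 ≤ n ∧ 1 - n ≤ p.2 ∧ p.2 ≤ n
instance (n : Int) (results : List (Int × Int)) : Decidable (Pre_solution n results) := by
  unfold Pre_solution; infer_instance

def pvWitness_solution : Int × (List (Int × Int)) := (3, [(1, 2), (2, 3)])

def Spec_solution (n : Int) (results : List (Int × Int)) (out : Int) : Prop := out = solution_alt n results
instance (n : Int) (results : List (Int × Int)) (out : Int) : Decidable (Spec_solution n results out) := by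
  unfold Spec_solution; infer_instance

-- ===== CLAIM (what is proved, stated in full; the proofs are below) =====
def Claim_equal_solution : Prop := ∀ (n : Int) (results : List (Int × Int)), Dom_solution n results → Pre_solution n results → Spec_solution n results (solution n results)

-- ===== LEMMAS AND PROOFS =====

-- the effective 0-based node of a raw label a (Python wraps negative list indices)
def nodeI (n a : Int) : Int := PySem.Int.mod (a - 1) n

-- edge relation of `results` on wrapped 0-based nodes
def Er (n : Int) (results : List (Int × Int)) (u v : Int) : Prop :=
  ∃ ab ∈ results, nodeI n ab.1 = u ∧ nodeI n ab.2 = v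

-- reachability by a nonempty path
def Reach (n : Int) (results : List (Int × Int)) (u v : Int) : Prop :=
  Relation.TransGen (Er n results) u v

-- a well-shaped N x N matrix
def Shaped (N : Nat) (g : List (List Int)) : Prop :=
  g.length = N ∧ ∀ row ∈ g, row.length = N

-- "nonempty path from u to v whose intermediate vertices are all < p"
-- (the Floyd-Warshall invariant), by recursion on p
def pB (n : Int) (results : List (Int × Int)) : Nat → Int → Int → Prop
  | 0, u, v => Er n results u v
  | (p+1), u, v => pB n results p u v ∨ (pB n results p u (p : Int) ∧ pB n results p (p : Int) v)

lemma getD_zero_of_all (r : List Int) (h : ∀ v ∈ r, v = 0) (y : Nat) : r.getD y 0 = 0 := by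
  rw [List.getD_eq_getElem?_getD]
  cases hy : r[y]? with
  | none => rfl
  | some v => simpa using h v (List.mem_of_getElem? hy)

lemma cellA_init (N x y : Nat) :
    cellA ((List.range N).map (fun _ => List.replicate N 0)) (x : Int) (y : Int) = 0 := by
  unfold cellA
  rw [PySem.List.pyGetD_natCast, PySem.List.pyGetD_natCast]
  apply getD_zero_of_all
  intro v hv
  rw [List.getD_eq_getElem?_getD] at hv
  cases hx : ((List.range N).map (fun _ => List.replicate N (0:Int)))[x]? with
  | none => rw [hx] at hv; simp at hv
  | some row =>
    rw [hx] at hv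
    have hrm := List.mem_of_getElem? hx
    simp only [List.mem_map] at hrm
    obtain ⟨_, _, rfl⟩ := hrm
    exact List.eq_of_mem_replicate (by simpa using hv)

lemma shaped_init (N : Nat) :
    Shaped N ((List.range N).map (fun _ => List.replicate N (0 : Int))) := by
  constructor
  · simp
  · intro row hrow
    simp only [List.mem_map] at hrow
    obtain ⟨_, _, rfl⟩ := hrow
    simp

lemma shaped_setA {N : Nat} {g : List (List Int)} (hs : Shaped N g) {i : Nat} (j : Nat)
    (hi : i < N) : Shaped N (setA g (i : Int) (j : Int)) := by
  obtain ⟨hlen, hrow⟩ := hs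
  unfold setA
  rw [PySem.List.pySetD_natCast, PySem.List.pySetD_natCast, PySem.List.pyGetD_natCast]
  refine ⟨by simpa using hlen, ?_⟩
  intro row hm
  rcases List.mem_or_eq_of_mem_set hm with h | h
  · exact hrow _ h
  · subst h
    rw [List.length_set]
    exact hrow _ (by rw [List.getD_eq_getElem _ _ (by omega)]; exact List.getElem_mem _)

lemma cellA_setA {N : Nat} {g : List (List Int)} (hs : Shaped N g) {i j : Nat}
    (hi : i < N) (hj : j < N) (x y : Nat) :
    cellA (setA g (i : Int) (j : Int)) (x : Int) (y : Int) =
      if x = i ∧ y = j then 1 else cellA g (x : Int) (y : Int) := by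
  obtain ⟨hlen, hrow⟩ := hs
  have hig : i < g.length := by omega
  have hrowlen : (g.getD i []).length = N := by
    rw [List.getD_eq_getElem _ _ hig]; exact hrow _ (List.getElem_mem _)
  unfold cellA setA
  simp only [PySem.List.pySetD_natCast, PySem.List.pyGetD_natCast]
  by_cases hx : x = i
  · subst hx
    have hset : (g.set x ((g.getD x []).set j 1)).getD x [] = (g.getD x []).set j 1 := by
      rw [List.getD_eq_getElem _ _ (by simpa using hig)]
      exact List.getElem_set_self _
    rw [hset]
    by_cases hy : y = j
    · subst hy
      rw [List.getD_eq_getElem _ _ (by rw [List.length_set]; omega)]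
      simp [List.getElem_set_self]
    · simp only [hy, and_false, if_false]
      rw [List.getD_eq_getElem?_getD, List.getD_eq_getElem?_getD, List.getElem?_set]
      simp [Ne.symm hy]
  · simp only [hx, false_and, if_false]
    have : (g.set i ((g.getD i []).set j 1)).getD x [] = g.getD x [] := by
      rw [List.getD_eq_getElem?_getD, List.getD_eq_getElem?_getD, List.getElem?_set]
      simp [Ne.symm hx]
    rw [this]

lemma mod_small (a n : Int) (hn : 0 < n) (h1 : -n ≤ a) (h2 : a < n) :
    PySem.Int.mod a n = if 0 ≤ a then a else a + n := by
  rw [PySem.Int.mod_eq_emod_of_pos hn]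
  split
  · exact Int.emod_eq_of_lt ‹0 ≤ a› h2
  · have h3 : (a + n) % n = a % n := by
      simpa using Int.add_mul_emod_self_left (a := a) (b := n) (c := 1)
    rw [← h3]
    exact Int.emod_eq_of_lt (by omega) (by omega)

lemma pySetD_neg_wrap {α : Type} (xs : List α) (i : Int) (v : α)
    (h1 : -(xs.length : Int) ≤ i) (h2 : i < 0) :
    PySem.List.pySetD xs i v = xs.set (i + xs.length).toNat v := by
  simp only [PySem.List.pySetD, PySem.List.pySet?, PySem.List.pyIdx?]
  rw [if_neg (by omega), if_pos h1]
  simp only [Option.map_some, Option.getD_some]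
  congr 1
  omega

lemma pyGetD_neg_wrap {α : Type} (xs : List α) (i : Int) (d : α)
    (h1 : -(xs.length : Int) ≤ i) (h2 : i < 0) :
    PySem.List.pyGetD xs i d = xs.getD (i + xs.length).toNat d := by
  simp only [PySem.List.pyGetD, PySem.List.pyGet?, PySem.List.pyIdx?]
  rw [if_neg (by omega), if_pos h1]
  simp only [Option.bind]
  rw [List.getD_eq_getElem?_getD]
  have h3 : xs.length - (-i).toNat = (i + xs.length).toNat := by omega
  rw [h3]

-- wrapped indexing agrees with indexing by the mod-normalised index
lemma pyGetD_wrap_mod {α : Type} (xs : List α) (n i : Int) (d : α) (hlen : (xs.length : Int) = n)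
    (hn : 0 < n) (h1 : -n ≤ i) (h2 : i < n) :
    PySem.List.pyGetD xs i d = xs.getD (PySem.Int.mod i n).toNat d := by
  rw [mod_small i n hn h1 h2]
  by_cases h0 : 0 ≤ i
  · rw [if_pos h0, PySem.List.pyGetD_of_nonneg _ _ h0]
  · rw [if_neg h0, pyGetD_neg_wrap xs i d (by omega) (by omega), hlen]

lemma pySetD_wrap_mod {α : Type} (xs : List α) (n i : Int) (v : α) (hlen : (xs.length : Int) = n)
    (hn : 0 < n) (h1 : -n ≤ i) (h2 : i < n) :
    PySem.List.pySetD xs i v = xs.set (PySem.Int.mod i n).toNat v := by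
  rw [mod_small i n hn h1 h2]
  by_cases h0 : 0 ≤ i
  · rw [if_pos h0, PySem.List.pySetD_of_nonneg _ _ h0]
  · rw [if_neg h0, pySetD_neg_wrap xs i v (by omega) (by omega), hlen]

-- writing graph[a-1][b-1] is writing at the wrapped node pair
lemma setA_wrap {N : Nat} {g : List (List Int)} (hs : Shaped N g) (n a b : Int)
    (hN : (N : Int) = n) (hn : 0 < n) (ha1 : -n ≤ a - 1) (ha2 : a - 1 < n)
    (hb1 : -n ≤ b - 1) (hb2 : b - 1 < n) :
    setA g (a - 1) (b - 1) = setA g (nodeI n a) (nodeI n b) := by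
  obtain ⟨hlen, hrow⟩ := hs
  have hglen : ((g.length : Nat) : Int) = n := by rw [hlen]; exact hN
  have hmodu : 0 ≤ PySem.Int.mod (a - 1) n := PySem.Int.mod_nonneg _ hn
  have hmodu' : PySem.Int.mod (a - 1) n < n := PySem.Int.mod_lt _ hn
  have hrowlen : (g.getD (PySem.Int.mod (a - 1) n).toNat []).length = N := by
    apply hrow
    rw [List.getD_eq_getElem _ _ (by omega)]
    exact List.getElem_mem _
  unfold setA nodeI
  rw [pyGetD_wrap_mod g n (a - 1) [] hglen hn ha1 ha2,
      pySetD_wrap_mod g n (a - 1) _ hglen hn ha1 ha2,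
      PySem.List.pyGetD_of_nonneg _ _ hmodu,
      PySem.List.pySetD_of_nonneg _ _ hmodu,
      pySetD_wrap_mod _ n (b - 1) _ (by rw [hrowlen]; exact hN) hn hb1 hb2,
      PySem.List.pySetD_of_nonneg _ _ (PySem.Int.mod_nonneg _ hn)]

lemma Er_bounds {n : Int} {results : List (Int × Int)} (hpre : Pre_solution n results)
    {u v : Int} (h : Er n results u v) : 0 ≤ u ∧ u < n ∧ 0 ≤ v ∧ v < n := by
  obtain ⟨ab, hm, h1, h2⟩ := h
  have hb := hpre ab hm
  have hn : 0 < n := by omega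
  refine ⟨?_, ?_, ?_, ?_⟩
  · rw [← h1]; exact PySem.Int.mod_nonneg _ hn
  · rw [← h1]; exact PySem.Int.mod_lt _ hn
  · rw [← h2]; exact PySem.Int.mod_nonneg _ hn
  · rw [← h2]; exact PySem.Int.mod_lt _ hn

lemma edge_fold (n : Int) (l : List (Int × Int)) :
    ∀ (g : List (List Int)), Shaped n.toNat g →
      (∀ p ∈ l, 1 - n ≤ p.1 ∧ p.1 ≤ n ∧ 1 - n ≤ p.2 ∧ p.2 ≤ n) →
      Shaped n.toNat (l.foldl (fun g ab => setA g (ab.1 - 1) (ab.2 - 1)) g) ∧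
      (∀ x y : Nat,
        cellA (l.foldl (fun g ab => setA g (ab.1 - 1) (ab.2 - 1)) g) (x : Int) (y : Int) ≠ 0 ↔
          cellA g (x : Int) (y : Int) ≠ 0 ∨
            ∃ ab ∈ l, nodeI n ab.1 = (x : Int) ∧ nodeI n ab.2 = (y : Int)) := by
  induction l with
  | nil => intro g hs _; simpa using hs
  | cons ab l ih =>
    intro g hs hb
    obtain ⟨ha1, ha2, hb1, hb2⟩ := hb ab (List.mem_cons_self ..)
    have hn : 0 < n := by omega
    have hNn : ((n.toNat : Nat) : Int) = n := by omega
    set i : Nat := (nodeI n ab.1).toNat with hidef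
    set j : Nat := (nodeI n ab.2).toNat with hjdef
    have hi : ((i : Nat) : Int) = nodeI n ab.1 :=
      Int.toNat_of_nonneg (PySem.Int.mod_nonneg _ hn)
    have hj : ((j : Nat) : Int) = nodeI n ab.2 :=
      Int.toNat_of_nonneg (PySem.Int.mod_nonneg _ hn)
    have hiN : i < n.toNat := by
      have := PySem.Int.mod_lt (ab.1 - 1) hn
      have := PySem.Int.mod_nonneg (ab.1 - 1) hn
      unfold nodeI at hidef
      omega
    have hjN : j < n.toNat := by
      have := PySem.Int.mod_lt (ab.2 - 1) hn
      have := PySem.Int.mod_nonneg (ab.2 - 1) hn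
      unfold nodeI at hjdef
      omega
    have hstep : setA g (ab.1 - 1) (ab.2 - 1) = setA g (i : Int) (j : Int) := by
      rw [hi, hj]
      exact setA_wrap hs n ab.1 ab.2 hNn hn (by omega) (by omega) (by omega) (by omega)
    have hs' : Shaped n.toNat (setA g (ab.1 - 1) (ab.2 - 1)) := by
      rw [hstep]; exact shaped_setA hs j hiN
    obtain ⟨ihs, ihc⟩ := ih (setA g (ab.1 - 1) (ab.2 - 1)) hs'
      (fun p hp => hb p (List.mem_cons_of_mem _ hp))
    refine ⟨by simpa using ihs, ?_⟩
    intro x y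
    rw [List.foldl_cons, ihc x y, hstep, cellA_setA hs hiN hjN x y]
    by_cases hxy : x = i ∧ y = j
    · obtain ⟨rfl, rfl⟩ := hxy
      simp only [and_self, if_pos trivial]
      constructor
      · intro _
        exact Or.inr ⟨ab, List.mem_cons_self .., hi.symm, hj.symm⟩
      · intro _; left; norm_num
    · rw [if_neg hxy]
      constructor
      · rintro (h | h)
        · exact Or.inl h
        · rcases h with ⟨ab', hm, e1, e2⟩
          exact Or.inr ⟨ab', List.mem_cons_of_mem _ hm, e1, e2⟩
      · rintro (h | ⟨ab', hm, e1, e2⟩)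
        · exact Or.inl h
        · rcases List.mem_cons.mp hm with rfl | hm'
          · exfalso
            apply hxy
            constructor
            · have : ((x : Nat) : Int) = ((i : Nat) : Int) := by rw [hi, e1]
              omega
            · have : ((y : Nat) : Int) = ((j : Nat) : Int) := by rw [hj, e2]
              omega
          · exact Or.inr ⟨ab', hm', e1, e2⟩

-- the inner k-loop: keeps shape, never clears a cell, and preserves soundness w.r.t. Reach
lemma fwInner_mono {N : Nat} (i j : Nat) (hj : j < N) :
    ∀ (l : List Nat), (∀ k ∈ l, k < N) → ∀ g, Shaped N g →
      (Shaped N (l.foldl (fun g (k : Nat) =>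
          if cellA g (j : Int) (i : Int) ≠ 0 ∧ cellA g (i : Int) (k : Int) ≠ 0
          then setA g (j : Int) (k : Int) else g) g) ∧
       (∀ x y : Nat, cellA g (x : Int) (y : Int) ≠ 0 →
          cellA (l.foldl (fun g (k : Nat) =>
            if cellA g (j : Int) (i : Int) ≠ 0 ∧ cellA g (i : Int) (k : Int) ≠ 0
            then setA g (j : Int) (k : Int) else g) g) (x : Int) (y : Int) ≠ 0) ∧
       ((∀ x y : Nat, cellA g (x : Int) (y : Int) ≠ 0 → Reach n results (x : Int) (y : Int)) →
        (∀ x y : Nat, cellA (l.foldl (fun g (k : Nat) =>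
            if cellA g (j : Int) (i : Int) ≠ 0 ∧ cellA g (i : Int) (k : Int) ≠ 0
            then setA g (j : Int) (k : Int) else g) g) (x : Int) (y : Int) ≠ 0 →
          Reach n results (x : Int) (y : Int)))) := by
  intro l
  induction l with
  | nil => intro _ g hs; exact ⟨hs, fun _ _ h => h, fun h => h⟩
  | cons k l ih =>
    intro hkl g hs
    have hkN : k < N := hkl k (List.mem_cons_self ..)
    set g' := if cellA g (j : Int) (i : Int) ≠ 0 ∧ cellA g (i : Int) (k : Int) ≠ 0
        then setA g (j : Int) (k : Int) else g with hg'
    have hs' : Shaped N g' := by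
      rw [hg']; split
      · exact shaped_setA hs k hj
      · exact hs
    have hmono : ∀ x y : Nat, cellA g (x : Int) (y : Int) ≠ 0 →
        cellA g' (x : Int) (y : Int) ≠ 0 := by
      intro x y h
      rw [hg']; split
      · rw [cellA_setA hs hj hkN x y]; split
        · norm_num
        · exact h
      · exact h
    have hsnd : (∀ x y : Nat, cellA g (x : Int) (y : Int) ≠ 0 → Reach n results (x : Int) (y : Int)) →
        ∀ x y : Nat, cellA g' (x : Int) (y : Int) ≠ 0 → Reach n results (x : Int) (y : Int) := by
      intro hS x y h
      rw [hg'] at h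
      by_cases hc : cellA g (j : Int) (i : Int) ≠ 0 ∧ cellA g (i : Int) (k : Int) ≠ 0
      · rw [if_pos hc, cellA_setA hs hj hkN x y] at h
        by_cases hxy : x = j ∧ y = k
        · obtain ⟨rfl, rfl⟩ := hxy
          exact Relation.TransGen.trans (hS _ _ hc.1) (hS _ _ hc.2)
        · rw [if_neg hxy] at h; exact hS _ _ h
      · rw [if_neg hc] at h; exact hS _ _ h
    obtain ⟨rs, rm, rsnd⟩ := ih (fun k hk => hkl k (List.mem_cons_of_mem _ hk)) g' hs'
    exact ⟨rs, fun x y h => rm x y (hmono x y h), fun hS => rsnd (hsnd hS)⟩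

-- if both premises of the relaxation at (j, k') hold, the inner loop sets cell (j, k')
lemma fwInner_hit {N : Nat} (i j k' : Nat) (hj : j < N) :
    ∀ (l : List Nat), (∀ k ∈ l, k < N) → k' ∈ l → ∀ g, Shaped N g →
      cellA g (j : Int) (i : Int) ≠ 0 → cellA g (i : Int) (k' : Int) ≠ 0 →
      cellA (l.foldl (fun g (k : Nat) =>
          if cellA g (j : Int) (i : Int) ≠ 0 ∧ cellA g (i : Int) (k : Int) ≠ 0
          then setA g (j : Int) (k : Int) else g) g) (j : Int) (k' : Int) ≠ 0 := by
  intro l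
  induction l with
  | nil => intro _ h; exact absurd h (List.not_mem_nil)
  | cons k l ih =>
    intro hkl hmem g hs h1 h2
    have hkN : k < N := hkl k (List.mem_cons_self ..)
    set g' := if cellA g (j : Int) (i : Int) ≠ 0 ∧ cellA g (i : Int) (k : Int) ≠ 0
        then setA g (j : Int) (k : Int) else g with hg'
    have hs' : Shaped N g' := by
      rw [hg']; split
      · exact shaped_setA hs k hj
      · exact hs
    have hmono : ∀ x y : Nat, cellA g (x : Int) (y : Int) ≠ 0 →
        cellA g' (x : Int) (y : Int) ≠ 0 := by
      intro x y h
      rw [hg']; split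
      · rw [cellA_setA hs hj hkN x y]; split
        · norm_num
        · exact h
      · exact h
    rw [List.foldl_cons]
    by_cases hk : k = k'
    · subst hk
      have hset : cellA g' (j : Int) (k : Int) ≠ 0 := by
        rw [hg', if_pos ⟨h1, h2⟩, cellA_setA hs hj hkN j k]
        simp
      exact (fwInner_mono (n := 0) (results := []) i j hj l
        (fun k hk => hkl k (List.mem_cons_of_mem _ hk)) g' hs').2.1 _ _ hset
    · have hmem' : k' ∈ l := by
        rcases List.mem_cons.mp hmem with h | h
        · exact absurd h.symm hk
        · exact h
      exact ih (fun k hk => hkl k (List.mem_cons_of_mem _ hk)) hmem' g' hs'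
        (hmono _ _ h1) (hmono _ _ h2)

-- the middle j-loop, lifted versions of the three facts
lemma fwRound_props {N : Nat} {results : List (Int × Int)} (i : Nat) :
    ∀ (l : List Nat), (∀ j ∈ l, j < N) → ∀ g, Shaped N g →
      (Shaped N (l.foldl (fun g (j : Nat) => fwInner N i j g) g) ∧
       (∀ x y : Nat, cellA g (x : Int) (y : Int) ≠ 0 →
          cellA (l.foldl (fun g (j : Nat) => fwInner N i j g) g) (x : Int) (y : Int) ≠ 0) ∧
       ((∀ x y : Nat, cellA g (x : Int) (y : Int) ≠ 0 → Reach n results (x : Int) (y : Int)) →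
        (∀ x y : Nat, cellA (l.foldl (fun g (j : Nat) => fwInner N i j g) g) (x : Int) (y : Int) ≠ 0 →
          Reach n results (x : Int) (y : Int)))) := by
  intro l
  induction l with
  | nil => intro _ g hs; exact ⟨hs, fun _ _ h => h, fun h => h⟩
  | cons j l ih =>
    intro hjl g hs
    have hjN : j < N := hjl j (List.mem_cons_self ..)
    obtain ⟨is_, im_, isnd_⟩ := fwInner_mono (n := n) (results := results) i j hjN
      (List.range N) (by simp) g hs
    obtain ⟨rs, rm, rsnd⟩ := ih (fun j hj => hjl j (List.mem_cons_of_mem _ hj)) (fwInner N i j g)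
      (by rw [fwInner]; exact is_)
    refine ⟨rs, ?_, ?_⟩
    · intro x y h
      exact rm x y (by rw [fwInner]; exact im_ x y h)
    · intro hS x y h
      exact rsnd (by rw [fwInner]; exact isnd_ hS) x y h

lemma fwRound_hit {N : Nat} (i j' k' : Nat) (hj' : j' < N) (hk' : k' < N) :
    ∀ (l : List Nat), (∀ j ∈ l, j < N) → j' ∈ l → ∀ g, Shaped N g →
      cellA g (j' : Int) (i : Int) ≠ 0 → cellA g (i : Int) (k' : Int) ≠ 0 →
      cellA (l.foldl (fun g (j : Nat) => fwInner N i j g) g) (j' : Int) (k' : Int) ≠ 0 := by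
  intro l
  induction l with
  | nil => intro _ h; exact absurd h (List.not_mem_nil)
  | cons j l ih =>
    intro hjl hmem g hs h1 h2
    have hjN : j < N := hjl j (List.mem_cons_self ..)
    obtain ⟨is_, im_, _⟩ := fwInner_mono (n := 0) (results := []) i j hjN
      (List.range N) (by simp) g hs
    rw [List.foldl_cons]
    by_cases hj : j = j'
    · subst hj
      have hset : cellA (fwInner N i j g) (j : Int) (k' : Int) ≠ 0 := by
        rw [fwInner]
        exact fwInner_hit i j k' hjN (List.range N) (by simp)
          (List.mem_range.mpr hk') g hs h1 h2
      exact (fwRound_props (n := 0) (results := []) i l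
        (fun j hj => hjl j (List.mem_cons_of_mem _ hj)) (fwInner N i j g)
        (by rw [fwInner]; exact is_)).2.1 _ _ hset
    · have hmem' : j' ∈ l := by
        rcases List.mem_cons.mp hmem with h | h
        · exact absurd h.symm hj
        · exact h
      exact ih (fun j hj => hjl j (List.mem_cons_of_mem _ hj)) hmem' (fwInner N i j g)
        (by rw [fwInner]; exact is_)
        (by rw [fwInner]; exact im_ _ _ h1) (by rw [fwInner]; exact im_ _ _ h2)

-- bounds on pB endpoints under the precondition
lemma pB_bounds {n : Int} {results : List (Int × Int)} (hpre : Pre_solution n results) :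
    ∀ (p : Nat) (u v : Int), pB n results p u v → 0 ≤ u ∧ u < n ∧ 0 ≤ v ∧ v < n := by
  intro p
  induction p with
  | zero =>
    intro u v h
    exact Er_bounds hpre h
  | succ p ih =>
    intro u v h
    rcases h with h | ⟨h1, h2⟩
    · exact ih u v h
    · have b1 := ih u _ h1
      have b2 := ih _ v h2
      omega

lemma pB_mono_p {results : List (Int × Int)} {p q : Nat} (h : p ≤ q) :
    ∀ {u v : Int}, pB n results p u v → pB n results q u v := by
  induction q with
  | zero => intro u v hp; have : p = 0 := by omega
            rwa [this] at hp
  | succ q ih =>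
    intro u v hp
    by_cases hpq : p = q + 1
    · rwa [hpq] at hp
    · exact Or.inl (ih (by omega) hp)

lemma pB_compose {results : List (Int × Int)} :
    ∀ (p : Nat) (u w v : Int), 0 ≤ w → w < (p : Int) →
      pB n results p u w → pB n results p w v → pB n results p u v := by
  intro p
  induction p with
  | zero => intro u w v h1 h2 _ _; norm_num at h2; omega
  | succ p ih =>
    intro u w v hw0 hwp huw hwv
    by_cases hw : w = (p : Int)
    · subst hw
      have h1 : pB n results p u (p : Int) := by
        rcases huw with h | ⟨h, _⟩ <;> exact h
      have h2 : pB n results p (p : Int) v := by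
        rcases hwv with h | ⟨_, h⟩ <;> exact h
      exact Or.inr ⟨h1, h2⟩
    · have hwp' : w < (p : Int) := by push_cast at hwp ⊢; omega
      rcases huw with h1 | ⟨ha, hb⟩ <;> rcases hwv with h2 | ⟨hc, hd⟩
      · exact Or.inl (ih u w v hw0 hwp' h1 h2)
      · exact Or.inr ⟨ih u w _ hw0 hwp' h1 hc, hd⟩
      · exact Or.inr ⟨ha, ih _ w v hw0 hwp' hb h2⟩
      · exact Or.inr ⟨ha, hd⟩

lemma reach_to_pB {n : Int} {results : List (Int × Int)} (hpre : Pre_solution n results)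
    {u v : Int} (h : Reach n results u v) : pB n results n.toNat u v := by
  induction h with
  | single h => exact pB_mono_p (Nat.zero_le _) h
  | tail hb hbc ih =>
    rename_i b c
    have hbnd : 0 ≤ b ∧ b < n := by
      have := Er_bounds hpre hbc
      omega
    have hbc' : pB n results n.toNat b c := pB_mono_p (Nat.zero_le _) hbc
    have hblt : b < (n.toNat : Int) := by omega
    exact pB_compose n.toNat u b c hbnd.1 hblt ih hbc'

-- the full Floyd-Warshall pass: a cell of the result is nonzero iff Reach holds
lemma fwAll_cell {n : Int} {results : List (Int × Int)} (hpre : Pre_solution n results) :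
    ∀ x y : Nat,
      cellA (fwAll n.toNat (results.foldl (fun g ab => setA g (ab.1 - 1) (ab.2 - 1))
          ((List.range n.toNat).map (fun _ => List.replicate n.toNat 0)))) (x : Int) (y : Int) ≠ 0 ↔
        Reach n results (x : Int) (y : Int) := by
  set N := n.toNat with hN
  set G1 := results.foldl (fun g ab => setA g (ab.1 - 1) (ab.2 - 1))
      ((List.range N).map (fun _ => List.replicate N 0)) with hG1
  obtain ⟨hs1, hc1⟩ := edge_fold n results _ (shaped_init N) hpre
  have hG1c : ∀ x y : Nat, cellA G1 (x : Int) (y : Int) ≠ 0 ↔ Er n results (x : Int) (y : Int) := by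
    intro x y
    rw [hG1, hc1 x y, cellA_init]
    simp [Er]
  have main : ∀ m : Nat, m ≤ N →
      Shaped N ((List.range m).foldl (fun g (i : Nat) => fwRound N i g) G1) ∧
      (∀ x y : Nat, cellA ((List.range m).foldl (fun g (i : Nat) => fwRound N i g) G1) (x : Int) (y : Int) ≠ 0 →
        Reach n results (x : Int) (y : Int)) ∧
      (∀ x y : Nat, pB n results m (x : Int) (y : Int) →
        cellA ((List.range m).foldl (fun g (i : Nat) => fwRound N i g) G1) (x : Int) (y : Int) ≠ 0) := by
    intro m
    induction m with
    | zero =>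
      intro _
      refine ⟨hs1, ?_, ?_⟩
      · intro x y h
        exact Relation.TransGen.single ((hG1c x y).mp h)
      · intro x y h
        exact (hG1c x y).mpr h
    | succ m ih =>
      intro hmN
      obtain ⟨ps, psnd, pcpl⟩ := ih (by omega)
      set gm := (List.range m).foldl (fun g (i : Nat) => fwRound N i g) G1 with hgm
      have hfold : (List.range (m+1)).foldl (fun g (i : Nat) => fwRound N i g) G1 = fwRound N m gm := by
        rw [List.range_succ, List.foldl_append]
        rfl
      obtain ⟨rs, rm, rsnd⟩ := fwRound_props (n := n) (results := results) m (List.range N) (by simp) gm ps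
      rw [hfold, fwRound]
      refine ⟨rs, rsnd psnd, ?_⟩
      intro x y h
      rcases h with h | ⟨h1, h2⟩
      · exact rm x y (pcpl x y h)
      · have hxb := pB_bounds hpre m _ _ h1
        have hyb := pB_bounds hpre m _ _ h2
        have hxN : x < N := by omega
        have hyN : y < N := by omega
        have c1 : cellA gm (x : Int) (m : Int) ≠ 0 := pcpl x m h1
        have c2 : cellA gm (m : Int) (y : Int) ≠ 0 := pcpl m y h2
        exact fwRound_hit m x y hxN hyN (List.range N) (by simp)
          (List.mem_range.mpr hxN) gm ps c1 c2
  intro x y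
  constructor
  · intro h
    exact ((main N le_rfl).2.1) _ _ (by rw [fwAll] at h; exact h)
  · intro h
    rw [fwAll]
    exact (main N le_rfl).2.2 _ _ (reach_to_pB hpre h)

-- weight contributed by inner index j to visited[i]
def wgt (g : List (List Int)) (i j : Nat) : Int :=
  (if cellA g (i : Int) (j : Int) ≠ 0 then 1 else 0) +
  (if cellA g (j : Int) (i : Int) ≠ 0 then 1 else 0)

lemma condIncr_getD (vis : List Int) (i m : Nat) (c : Prop) [Decidable c] (hi : i < vis.length) :
    ((if c then PySem.List.pySetD vis (i : Int) (PySem.List.pyGetD vis (i : Int) 0 + 1) else vis).length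
        = vis.length) ∧
    ((if c then PySem.List.pySetD vis (i : Int) (PySem.List.pyGetD vis (i : Int) 0 + 1) else vis).getD m 0
        = if m = i then vis.getD m 0 + (if c then 1 else 0) else vis.getD m 0) := by
  constructor
  · split
    · exact PySem.List.length_pySetD ..
    · rfl
  · by_cases hm : m = i
    · subst hm
      rw [if_pos rfl]
      by_cases hc : c
      · rw [if_pos hc, if_pos hc, PySem.List.pySetD_natCast, PySem.List.pyGetD_natCast,
          List.getD_eq_getElem _ _ (by simpa using hi)]
        simp [List.getElem_set_self]
      · rw [if_neg hc, if_neg hc]; ring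
    · rw [if_neg hm]
      by_cases hc : c
      · rw [if_pos hc, PySem.List.pySetD_natCast, List.getD_eq_getElem?_getD,
          List.getD_eq_getElem?_getD, List.getElem?_set]
        simp [Ne.symm hm]
      · rw [if_neg hc]

-- the two conditional increments of one inner iteration, as named functions
def visStep1 (g : List (List Int)) (i : Nat) (vis : List Int) (j : Nat) : List Int :=
  if cellA g (i : Int) (j : Int) ≠ 0 then
    PySem.List.pySetD vis (i : Int) (PySem.List.pyGetD vis (i : Int) 0 + 1) else vis

def visStep (g : List (List Int)) (i : Nat) (vis : List Int) (j : Nat) : List Int :=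
  if cellA g (j : Int) (i : Int) ≠ 0 then
    PySem.List.pySetD (visStep1 g i vis j) (i : Int)
      (PySem.List.pyGetD (visStep1 g i vis j) (i : Int) 0 + 1) else visStep1 g i vis j

lemma visStep_facts (g : List (List Int)) (i j : Nat) (vis : List Int) (hi : i < vis.length) :
    (visStep g i vis j).length = vis.length ∧
    ∀ m : Nat, (visStep g i vis j).getD m 0 =
      if m = i then vis.getD m 0 + wgt g i j else vis.getD m 0 := by
  have s1 := fun m => condIncr_getD vis i m (cellA g (i : Int) (j : Int) ≠ 0) hi
  have hlen1 : (visStep1 g i vis j).length = vis.length := by rw [visStep1]; exact (s1 0).1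
  have hgd1 : ∀ m : Nat, (visStep1 g i vis j).getD m 0 =
      if m = i then vis.getD m 0 + (if cellA g (i : Int) (j : Int) ≠ 0 then 1 else 0)
      else vis.getD m 0 := by
    intro m; rw [visStep1]; exact (s1 m).2
  have s2 := fun m => condIncr_getD (visStep1 g i vis j) i m
    (cellA g (j : Int) (i : Int) ≠ 0) (by omega)
  constructor
  · rw [visStep, ← hlen1]
    exact (s2 0).1
  · intro m
    rw [visStep]
    rw [(s2 m).2, hgd1 m]
    by_cases hm : m = i
    · subst hm
      rw [if_pos rfl, if_pos rfl, if_pos rfl, wgt]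
      ring
    · rw [if_neg hm, if_neg hm, if_neg hm]

-- the inner visited loop adds the total weight at index i and nothing elsewhere
lemma visInner_spec (g : List (List Int)) (i : Nat) :
    ∀ (l : List Nat) (vis : List Int), i < vis.length →
      ((l.foldl (visStep g i) vis).length = vis.length ∧
       ∀ m : Nat, (l.foldl (visStep g i) vis).getD m 0 =
         if m = i then vis.getD m 0 + (l.map (wgt g i)).sum else vis.getD m 0) := by
  intro l
  induction l with
  | nil => intro vis _; exact ⟨rfl, fun m => by split <;> simp⟩
  | cons j l ih =>
    intro vis hi
    obtain ⟨hlen1, hgd1⟩ := visStep_facts g i j vis hi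
    obtain ⟨rl, rg⟩ := ih (visStep g i vis j) (by omega)
    rw [List.foldl_cons]
    refine ⟨by rw [rl, hlen1], ?_⟩
    intro m
    rw [rg m, hgd1 m]
    by_cases hm : m = i
    · subst hm
      rw [if_pos rfl, if_pos rfl, if_pos rfl, List.map_cons, List.sum_cons]
      ring
    · rw [if_neg hm, if_neg hm, if_neg hm]

-- the port's inner loop is that fold
lemma visInner_eq (N : Nat) (g : List (List Int)) (i : Nat) (vis : List Int) :
    visInner N g i vis = (List.range N).foldl (visStep g i) vis := rfl

-- the outer visited loop writes each index once
lemma visOuter_spec (N : Nat) (g : List (List Int)) :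
    ∀ (l : List Nat), (∀ i ∈ l, i < N) → l.Nodup → ∀ (vis : List Int), vis.length = N →
      ((l.foldl (fun vis (i : Nat) => visInner N g i vis) vis).length = N ∧
       ∀ m : Nat, m < N →
         (l.foldl (fun vis (i : Nat) => visInner N g i vis) vis).getD m 0 =
           if m ∈ l then vis.getD m 0 + ((List.range N).map (wgt g m)).sum else vis.getD m 0) := by
  intro l
  induction l with
  | nil => intro _ _ vis hlen; exact ⟨hlen, fun m _ => by simp⟩
  | cons i l ih =>
    intro hb hnd vis hlen
    have hiN : i < N := hb i (List.mem_cons_self ..)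
    obtain ⟨slen, sgd⟩ := visInner_spec g i (List.range N) vis (by omega)
    have hv1len : (visInner N g i vis).length = N := by rw [visInner_eq, slen, hlen]
    have hv1gd : ∀ m : Nat, (visInner N g i vis).getD m 0 =
        if m = i then vis.getD m 0 + ((List.range N).map (wgt g i)).sum else vis.getD m 0 := by
      intro m; rw [visInner_eq, sgd m]
    obtain ⟨rl, rg⟩ := ih (fun x hx => hb x (List.mem_cons_of_mem _ hx)) hnd.of_cons
      (visInner N g i vis) hv1len
    rw [List.foldl_cons]
    refine ⟨rl, ?_⟩
    intro m hm
    rw [rg m hm, hv1gd m]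
    by_cases hmi : m = i
    · subst hmi
      have hml : m ∉ l := (List.nodup_cons.mp hnd).1
      rw [if_neg hml, if_pos rfl, if_pos (List.mem_cons_self ..)]
    · rw [if_neg hmi]
      by_cases hml : m ∈ l
      · rw [if_pos hml, if_pos (List.mem_cons_of_mem _ hml)]
      · rw [if_neg hml, if_neg (by simp [hmi, hml])]

-- A's value as a countP over the weights of the closed matrix
lemma solution_val (n : Int) (results : List (Int × Int)) :
    solution n results =
      (((List.range n.toNat).countP (fun m =>
          ((List.range n.toNat).map (wgt (fwAll n.toNat (results.foldl
            (fun g ab => setA g (ab.1 - 1) (ab.2 - 1))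
            ((List.range n.toNat).map (fun _ => List.replicate n.toNat 0)))) m)).sum == n - 1) : Nat) : Int) := by
  simp only [solution]
  set N := n.toNat with hN
  set GF := fwAll N (results.foldl (fun g ab => setA g (ab.1 - 1) (ab.2 - 1))
      ((List.range N).map (fun _ => List.replicate N 0))) with hGF
  set visF := (List.range N).foldl (fun vis (i : Nat) => visInner N GF i vis)
      (List.replicate N 0) with hvisF
  obtain ⟨flen, fgd⟩ := visOuter_spec N GF (List.range N) (by simp) List.nodup_range
    (List.replicate N 0) (by simp)
  have hvis : visF = (List.range N).map
      (fun m => ((List.range N).map (wgt GF m)).sum) := by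
    apply List.ext_getElem (by rw [hvisF, flen]; simp)
    intro m h1 h2
    have hmN : m < N := by rw [hvisF, flen] at h1; exact h1
    have hval := fgd m hmN
    rw [if_pos (List.mem_range.mpr hmN), List.getD_replicate _ hmN, zero_add] at hval
    calc visF[m] = visF.getD m 0 := (List.getD_eq_getElem _ _ h1).symm
      _ = ((List.range N).map (wgt GF m)).sum := by rw [hvisF]; exact hval
      _ = ((List.range N).map (fun m => ((List.range N).map (wgt GF m)).sum))[m] := by
          rw [List.getElem_map, List.getElem_range]
  rw [hvis, List.count_eq_countP, List.countP_map]
  rfl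

-- sum of weights = out-count + in-count
lemma wgt_sum (g : List (List Int)) (N m : Nat) :
    ((List.range N).map (wgt g m)).sum =
      ((List.range N).countP (fun (j : Nat) => decide (cellA g (m : Int) (j : Int) ≠ 0)) : Int) +
      ((List.range N).countP (fun (j : Nat) => decide (cellA g (j : Int) (m : Int) ≠ 0)) : Int) := by
  unfold wgt
  rw [PySem.List.sum_map_add_int]
  congr 1
  · rw [← PySem.List.sum_map_ite_one_zero (fun (j : Nat) => decide (cellA g (m : Int) (j : Int) ≠ 0))]
    apply congrArg
    apply List.map_congr_left
    intro j _
    by_cases h : cellA g (m : Int) (j : Int) ≠ 0 <;> simp [h]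
  · rw [← PySem.List.sum_map_ite_one_zero (fun (j : Nat) => decide (cellA g (j : Int) (m : Int) ≠ 0))]
    apply congrArg
    apply List.map_congr_left
    intro j _
    by_cases h : cellA g (j : Int) (m : Int) ≠ 0 <;> simp [h]

-- ===== B-side lemmas =====

-- seen-array membership: slot u (0-based, in range) is marked
def At (seen : List Bool) (u : Int) : Prop := seen.getD u.toNat false = true

-- the adjacency-list edge relation: a raw entry of row u normalises to v
def EA (n : Int) (adj : List (List Int)) (u v : Int) : Prop :=
  ∃ w ∈ adj.getD u.toNat [], PySem.Int.mod w n = v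

-- the DFS potential: stack size plus total adjacency of unmarked slots
def phi (adj : List (List Int)) (seen : List Bool) (stack : List Int) : Nat :=
  stack.length +
    ((List.range adj.length).map
      (fun u => if seen.getD u false then 0 else (adj.getD u []).length)).sum

-- getD after a set, elementwise
lemma getD_set_eq {α : Type} (l : List α) (e u : Nat) (a d : α) (he : e < l.length) :
    (l.set e a).getD u d = if u = e then a else l.getD u d := by
  rw [List.getD_eq_getElem?_getD, List.getD_eq_getElem?_getD, List.getElem?_set]
  by_cases hu : u = e
  · subst hu
    simp [he]
  · simp [Ne.symm hu, hu]

-- building the adjacency lists: length is kept and row membership is characterised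
lemma adj_fold (n : Int) (k1 k2 : Int × Int → Int) (hn : 0 < n) :
    ∀ (l : List (Int × Int)) (g : List (List Int)), (g.length : Int) = n →
      (∀ ab ∈ l, -n ≤ k1 ab - 1 ∧ k1 ab - 1 < n) →
      ((l.foldl (fun g ab => adjAppend g (k1 ab - 1) (k2 ab - 1)) g).length : Int) = n ∧
      (∀ u : Nat, (u : Int) < n → ∀ w : Int,
        (w ∈ (l.foldl (fun g ab => adjAppend g (k1 ab - 1) (k2 ab - 1)) g).getD u [] ↔
          w ∈ g.getD u [] ∨ ∃ ab ∈ l, PySem.Int.mod (k1 ab - 1) n = (u : Int) ∧ k2 ab - 1 = w)) := by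
  intro l
  induction l with
  | nil => intro g hg _; exact ⟨hg, fun u hu w => by simp⟩
  | cons ab l ih =>
    intro g hg hb
    obtain ⟨hb1, hb2⟩ := hb ab (List.mem_cons_self ..)
    have hmn := PySem.Int.mod_nonneg (k1 ab - 1) hn
    have hml := PySem.Int.mod_lt (k1 ab - 1) hn
    set e : Nat := (PySem.Int.mod (k1 ab - 1) n).toNat with he
    have heg : e < g.length := by omega
    have hstep : adjAppend g (k1 ab - 1) (k2 ab - 1) =
        g.set e (g.getD e [] ++ [k2 ab - 1]) := by
      unfold adjAppend
      rw [pyGetD_wrap_mod g n _ [] hg hn hb1 hb2, pySetD_wrap_mod g n _ _ hg hn hb1 hb2]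
    have hg' : (((g.set e (g.getD e [] ++ [k2 ab - 1])).length : Nat) : Int) = n := by
      rw [List.length_set]; exact hg
    obtain ⟨rl, rc⟩ := ih (g.set e (g.getD e [] ++ [k2 ab - 1])) hg'
      (fun p hp => hb p (List.mem_cons_of_mem _ hp))
    rw [List.foldl_cons, hstep]
    refine ⟨rl, ?_⟩
    intro u hu w
    rw [rc u hu w, getD_set_eq g e u _ [] heg]
    by_cases hue : u = e
    · subst hue
      rw [if_pos rfl]
      simp only [List.mem_append, List.mem_cons, List.not_mem_nil, or_false]
      constructor
      · rintro ((h | h) | ⟨ab', hm, e1, e2⟩)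
        · exact Or.inl h
        · exact Or.inr ⟨ab, Or.inl rfl, by omega, h.symm⟩
        · exact Or.inr ⟨ab', Or.inr hm, e1, e2⟩
      · rintro (h | ⟨ab', (rfl | hm), e1, e2⟩)
        · exact Or.inl (Or.inl h)
        · exact Or.inl (Or.inr e2.symm)
        · exact Or.inr ⟨ab', hm, e1, e2⟩
    · rw [if_neg hue]
      constructor
      · rintro (h | ⟨ab', hm, e1, e2⟩)
        · exact Or.inl h
        · exact Or.inr ⟨ab', List.mem_cons_of_mem _ hm, e1, e2⟩
      · rintro (h | ⟨ab', hm, e1, e2⟩)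
        · exact Or.inl h
        · rcases List.mem_cons.mp hm with rfl | hm'
          · exact absurd (by omega : u = e) hue
          · exact Or.inr ⟨ab', hm', e1, e2⟩

-- a sum over a range where one term is zeroed out
lemma sum_flip (N e : Nat) (he : e < N) (f f' : Nat → Nat)
    (hag : ∀ u, u ≠ e → f u = f' u) (hf' : f' e = 0) :
    ((List.range N).map f).sum = ((List.range N).map f').sum + f e := by
  induction N with
  | zero => exact absurd he (Nat.not_lt_zero e)
  | succ N ihN =>
    rw [List.range_succ, List.map_append, List.map_append, List.sum_append, List.sum_append]
    simp only [List.map_cons, List.map_nil, List.sum_cons, List.sum_nil, add_zero]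
    by_cases heN : e = N
    · subst heN
      have hmap : (List.range e).map f = (List.range e).map f' := by
        apply List.map_congr_left
        intro u hu
        exact hag u (by have := List.mem_range.mp hu; omega)
      rw [hmap, hf']
      omega
    · rw [ihN (by omega), hag N (by omega)]
      omega

-- the DFS worklist loop: length, monotonicity, soundness, closure, and coverage
lemma dfs_loop (n : Int) (adj : List (List Int)) (hn : 0 < n) (hlen : (adj.length : Int) = n)
    (hent : ∀ u : Nat, ∀ w ∈ adj.getD u [], -n ≤ w ∧ w < n) (P : Int → Prop)
    (hP : ∀ u v : Int, 0 ≤ u → u < n → P u → EA n adj u v → P v) :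
    ∀ (fuel : Nat) (seen : List Bool) (stack : List Int),
      seen.length = adj.length →
      fuel ≥ phi adj seen stack →
      (∀ w ∈ stack, -n ≤ w ∧ w < n) →
      (∀ u : Int, 0 ≤ u → u < n → At seen u → P u) →
      (∀ w ∈ stack, P (PySem.Int.mod w n)) →
      (∀ u : Int, 0 ≤ u → u < n → At seen u → ∀ v, EA n adj u v →
        At seen v ∨ ∃ w ∈ stack, PySem.Int.mod w n = v) →
      (dfsLoop adj fuel seen stack).length = adj.length ∧
      (∀ u : Int, 0 ≤ u → u < n → At seen u → At (dfsLoop adj fuel seen stack) u) ∧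
      (∀ u : Int, 0 ≤ u → u < n → At (dfsLoop adj fuel seen stack) u → P u) ∧
      (∀ u : Int, 0 ≤ u → u < n → At (dfsLoop adj fuel seen stack) u → ∀ v, EA n adj u v →
        At (dfsLoop adj fuel seen stack) v) ∧
      (∀ w ∈ stack, At (dfsLoop adj fuel seen stack) (PySem.Int.mod w n)) := by
  intro fuel
  induction fuel with
  | zero =>
    intro seen stack hseen hfuel hstk hI1 hI2 hI3
    have hstack : stack = [] := by
      unfold phi at hfuel
      cases stack with
      | nil => rfl
      | cons a t => simp at hfuel
    subst hstack
    show seen.length = adj.length ∧ _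
    refine ⟨hseen, fun u _ _ h => h, hI1, ?_, by simp⟩
    intro u h0 h1 hAt v hEA
    rcases hI3 u h0 h1 hAt v hEA with h | ⟨w, hw, _⟩
    · exact h
    · exact absurd hw (List.not_mem_nil)
  | succ f ih =>
    intro seen stack hseen hfuel hstk hI1 hI2 hI3
    cases stack with
    | nil =>
      show seen.length = adj.length ∧ _
      refine ⟨hseen, fun u _ _ h => h, hI1, ?_, by simp⟩
      intro u h0 h1 hAt v hEA
      rcases hI3 u h0 h1 hAt v hEA with h | ⟨w, hw, _⟩
      · exact h
      · exact absurd hw (List.not_mem_nil)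
    | cons a t =>
      have hne : (a :: t) ≠ [] := by simp
      set v := (a :: t).getLastD 0 with hv
      set rest := (a :: t).dropLast with hrest
      have hvlast : v = (a :: t).getLast hne := by
        rw [hv, List.getLastD_eq_getLast?, List.getLast?_eq_some_getLast hne]
        rfl
      have hvmem : v ∈ a :: t := hvlast ▸ List.getLast_mem hne
      have hsplit : rest ++ [v] = a :: t := by
        rw [hrest, hvlast]
        exact List.dropLast_append_getLast hne
      have hrestlen : rest.length + 1 = (a :: t).length := by
        have := congrArg List.length hsplit
        simpa using this
      obtain ⟨hv1, hv2⟩ := hstk v hvmem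
      have hslenI : (seen.length : Int) = n := by rw [hseen]; exact hlen
      set u' := PySem.Int.mod v n with hu'
      have hu'0 : 0 ≤ u' := PySem.Int.mod_nonneg _ hn
      have hu'n : u' < n := PySem.Int.mod_lt _ hn
      set e : Nat := u'.toNat with hedef
      have hes : e < seen.length := by omega
      have heff : PySem.List.pyGetD seen v false = seen.getD e false := by
        rw [pyGetD_wrap_mod seen n v false hslenI hn hv1 hv2]
      have hrow : PySem.List.pyGetD adj v [] = adj.getD e [] := by
        rw [pyGetD_wrap_mod adj n v [] hlen hn hv1 hv2]
      have hmemrest : ∀ w ∈ rest, w ∈ a :: t := by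
        intro w hw
        rw [← hsplit]
        exact List.mem_append_left _ hw
      have hunf : dfsLoop adj (f + 1) seen (a :: t) =
          if PySem.List.pyGetD seen ((a :: t).getLastD 0) false = false then
            dfsLoop adj f (PySem.List.pySetD seen ((a :: t).getLastD 0) true)
              ((a :: t).dropLast ++ PySem.List.pyGetD adj ((a :: t).getLastD 0) [])
          else dfsLoop adj f seen ((a :: t).dropLast) := rfl
      by_cases hsv : seen.getD e false = false
      · -- v not yet seen: mark it and push its adjacency row
        set seen' := seen.set e true with hseen'
        have hset : PySem.List.pySetD seen v true = seen' := by
          rw [hseen', pySetD_wrap_mod seen n v true hslenI hn hv1 hv2]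
        have hstep : dfsLoop adj (f + 1) seen (a :: t) =
            dfsLoop adj f seen' (rest ++ adj.getD e []) := by
          rw [hunf, ← hv, heff, if_pos hsv, hset, hrow, ← hrest]
        have hs'len : seen'.length = adj.length := by
          rw [hseen', List.length_set]; exact hseen
        have hAt' : ∀ u : Int, 0 ≤ u → u < n → (At seen' u ↔ (u = u' ∨ At seen u)) := by
          intro u h0 h1
          unfold At
          rw [hseen', getD_set_eq seen e u.toNat true false hes]
          constructor
          · intro h
            by_cases hue : u.toNat = e
            · left; omega
            · right; rwa [if_neg hue] at h
          · rintro (rfl | h)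
            · rw [if_pos (by omega)]
            · by_cases hue : u.toNat = e
              · rw [if_pos hue]
              · rwa [if_neg hue]
        have hAtmono : ∀ u : Int, At seen u → At seen' u := by
          intro u h
          unfold At at h ⊢
          rw [hseen', getD_set_eq seen e u.toNat true false hes]
          by_cases hue : u.toNat = e
          · rw [if_pos hue]
          · rwa [if_neg hue]
        have hAtu' : At seen' u' := by
          unfold At
          rw [hseen', getD_set_eq seen e e true false hes, if_pos rfl]
        -- the potential strictly decreases
        have hphi : phi adj seen' (rest ++ adj.getD e []) + 1 = phi adj seen (a :: t) := by
          unfold phi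
          rw [List.length_append]
          have hea : e < adj.length := by rw [← hseen]; exact hes
          have hflip := sum_flip adj.length e hea
            (fun u => if seen.getD u false then 0 else (adj.getD u []).length)
            (fun u => if seen'.getD u false then 0 else (adj.getD u []).length)
            (by
              intro u hue
              dsimp only
              rw [hseen', getD_set_eq seen e u true false hes, if_neg hue])
            (by
              dsimp only
              rw [hseen', getD_set_eq seen e e true false hes, if_pos rfl]
              simp)
          dsimp only at hflip
          rw [hflip, hsv]
          simp only [Bool.false_eq_true, if_false]
          set S := ((List.range adj.length).map
            (fun u => if seen'.getD u false then 0 else (adj.getD u []).length)).sum with hS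
          omega
        have hcall := ih seen' (rest ++ adj.getD e []) hs'len (by omega)
          (by
            intro w hw
            rcases List.mem_append.mp hw with h | h
            · exact hstk w (hmemrest w h)
            · exact hent e w h)
          (by
            intro u h0 h1 hA
            rcases (hAt' u h0 h1).mp hA with rfl | h
            · exact hI2 v hvmem
            · exact hI1 u h0 h1 h)
          (by
            intro w hw
            rcases List.mem_append.mp hw with h | h
            · exact hI2 w (hmemrest w h)
            · exact hP u' (PySem.Int.mod w n) hu'0 hu'n (hI2 v hvmem) ⟨w, h, rfl⟩)
          (by
            intro u h0 h1 hA w' hEA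
            rcases (hAt' u h0 h1).mp hA with rfl | h
            · obtain ⟨w, hwm, hwmod⟩ := hEA
              exact Or.inr ⟨w, List.mem_append_right _ hwm, hwmod⟩
            · rcases hI3 u h0 h1 h w' hEA with hc | ⟨w, hwm, hwmod⟩
              · exact Or.inl (hAtmono w' hc)
              · rw [← hsplit] at hwm
                rcases List.mem_append.mp hwm with h' | h'
                · exact Or.inr ⟨w, List.mem_append_left _ h', hwmod⟩
                · have hwv : w = v := by simpa using h'
                  subst hwv
                  exact Or.inl (hwmod ▸ hAtu'))
        obtain ⟨c1, c2, c3, c4, c5⟩ := hcall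
        rw [hstep]
        refine ⟨c1, ?_, c3, c4, ?_⟩
        · intro u h0 h1 hA
          exact c2 u h0 h1 (hAtmono u hA)
        · intro w hw
          rw [← hsplit] at hw
          rcases List.mem_append.mp hw with h' | h'
          · exact c5 w (List.mem_append_left _ h')
          · have hwv : w = v := by simpa using h'
            subst hwv
            exact c2 u' hu'0 hu'n hAtu'
      · -- v already seen: just drop it from the stack
        have hAtv : At seen u' := by
          unfold At
          rw [← hedef]
          cases hb : seen.getD e false with
          | false => exact absurd hb hsv
          | true => rfl
        have hstep : dfsLoop adj (f + 1) seen (a :: t) = dfsLoop adj f seen rest := by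
          rw [hunf, ← hv, heff, if_neg hsv, ← hrest]
        have hphi : phi adj seen rest + 1 = phi adj seen (a :: t) := by
          unfold phi
          set S := ((List.range adj.length).map
            (fun u => if seen.getD u false then 0 else (adj.getD u []).length)).sum with hS
          omega
        have hcall := ih seen rest hseen (by omega)
          (fun w hw => hstk w (hmemrest w hw))
          hI1
          (fun w hw => hI2 w (hmemrest w hw))
          (by
            intro u h0 h1 hA w' hEA
            rcases hI3 u h0 h1 hA w' hEA with hc | ⟨w, hwm, hwmod⟩
            · exact Or.inl hc
            · rw [← hsplit] at hwm
              rcases List.mem_append.mp hwm with h' | h'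
              · exact Or.inr ⟨w, h', hwmod⟩
              · have hwv : w = v := by simpa using h'
                subst hwv
                exact Or.inl (hwmod ▸ hAtv))
        obtain ⟨c1, c2, c3, c4, c5⟩ := hcall
        rw [hstep]
        refine ⟨c1, c2, c3, c4, ?_⟩
        intro w hw
        rw [← hsplit] at hw
        rcases List.mem_append.mp hw with h' | h'
        · exact c5 w h'
        · have hwv : w = v := by simpa using h'
          subst hwv
          exact c2 u' hu'0 hu'n hAtv

-- counting true slots is a countP over the indices
lemma count_true_eq_countP (s : List Bool) :
    s.count true = (List.range s.length).countP (fun u => s.getD u false) := by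
  induction s with
  | nil => rfl
  | cons x s ih =>
    rw [List.count_cons, List.length_cons, List.range_succ_eq_map, List.countP_cons,
      List.countP_map, ih]
    cases x <;> simp [Function.comp_def, Nat.add_comm]

-- countReach counts exactly the nodes reachable from i through the adjacency lists
lemma countReach_spec (n : Int) (adj : List (List Int)) (hn : 0 < n)
    (hlen : (adj.length : Int) = n)
    (hent : ∀ u : Nat, ∀ w ∈ adj.getD u [], -n ≤ w ∧ w < n) (i : Nat) (hi : (i : Int) < n)
    (d : Nat → Bool)
    (hd : ∀ u : Nat, d u = true ↔ Relation.TransGen (EA n adj) (i : Int) (u : Int)) :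
    countReach n adj (i : Int) = ((List.range n.toNat).countP d : Int) := by
  simp only [countReach]
  set N := n.toNat with hN
  have hadjN : adj.length = N := by omega
  have hiA : i < adj.length := by omega
  have hstack0 : PySem.List.pyGetD adj ((i : Nat) : Int) [] = adj.getD i [] := by
    rw [PySem.List.pyGetD_natCast]
  have hrepl : ∀ k : Nat, (List.replicate N false).getD k false = false := by
    intro k
    rw [List.getD_eq_getElem?_getD, List.getElem?_replicate]
    split <;> rfl
  have hAt0 : ∀ u : Int, ¬ At (List.replicate N false) u := by
    intro u h
    unfold At at h
    rw [hrepl] at h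
    exact Bool.false_ne_true h
  have hrange_eq : (List.range adj.length).map (fun u => (adj.getD u []).length) =
      adj.map List.length := by
    apply List.ext_getElem (by simp)
    intro k h1 h2
    have hk : k < adj.length := by simpa using h1
    rw [List.getElem_map, List.getElem_map, List.getElem_range,
      List.getD_eq_getElem adj [] hk]
  have hrowmem : (adj.getD i []).length ∈ adj.map List.length := by
    rw [List.getD_eq_getElem adj [] hiA]
    exact List.mem_map_of_mem (List.getElem_mem _)
  have hrowle : (adj.getD i []).length ≤ (adj.map List.length).sum :=
    List.single_le_sum (fun x _ => Nat.zero_le x) _ hrowmem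
  have hsum_eq : ((List.range adj.length).map
      (fun u => if (List.replicate N false).getD u false then 0
        else (adj.getD u []).length)).sum = (adj.map List.length).sum := by
    rw [← hrange_eq]
    congr 1
    apply List.map_congr_left
    intro u _
    rw [hrepl]
    simp
  have hfuel : 2 * (adj.map List.length).sum + 1 ≥
      phi adj (List.replicate N false) (adj.getD i []) := by
    unfold phi
    rw [hsum_eq]
    omega
  have H := dfs_loop n adj hn hlen hent (Relation.TransGen (EA n adj) ((i : Nat) : Int))
    (fun u v _ _ hPu hEA => Relation.TransGen.tail hPu hEA)
    (2 * (adj.map List.length).sum + 1) (List.replicate N false) (adj.getD i [])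
    (by simp [hadjN]) hfuel
    (fun w hw => hent i w hw)
    (fun u _ _ h => absurd h (hAt0 u))
    (fun w hw => Relation.TransGen.single ⟨w, by simpa using hw, rfl⟩)
    (fun u _ _ h => absurd h (hAt0 u))
  rw [hstack0]
  obtain ⟨c1, c2, c3, c4, c5⟩ := H
  set out := dfsLoop adj (2 * (adj.map List.length).sum + 1)
    (List.replicate N false) (adj.getD i []) with hout
  have hEAb : ∀ x y : Int, EA n adj x y → 0 ≤ y ∧ y < n := by
    rintro x y ⟨w, _, hm⟩
    rw [← hm]
    exact ⟨PySem.Int.mod_nonneg _ hn, PySem.Int.mod_lt _ hn⟩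
  have hTb : ∀ x : Int, Relation.TransGen (EA n adj) ((i : Nat) : Int) x → 0 ≤ x ∧ x < n := by
    intro x h
    induction h with
    | single e => exact hEAb _ _ e
    | tail _ e _ => exact hEAb _ _ e
  have hcov : ∀ x : Int, Relation.TransGen (EA n adj) ((i : Nat) : Int) x → At out x := by
    intro x h
    induction h with
    | single e =>
      obtain ⟨w, hw, hm⟩ := e
      exact hm ▸ c5 w (by simpa using hw)
    | tail hs e ihh =>
      have hb := hTb _ hs
      exact c4 _ hb.1 hb.2 ihh _ e
  have hchar : ∀ u : Nat, u < N → (out.getD u false = true ↔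
      Relation.TransGen (EA n adj) ((i : Nat) : Int) ((u : Nat) : Int)) := by
    intro u hu
    constructor
    · intro h
      exact c3 ((u : Nat) : Int) (by omega) (by omega) (by unfold At; simpa using h)
    · intro h
      have := hcov _ h
      unfold At at this
      simpa using this
  have hcount : out.count true = (List.range N).countP d := by
    rw [count_true_eq_countP, c1, hadjN]
    apply List.countP_congr
    intro u hu
    have huN := List.mem_range.mp hu
    by_cases hr : Relation.TransGen (EA n adj) ((i : Nat) : Int) ((u : Nat) : Int)
    · rw [(hchar u huN).mpr hr, (hd u).mpr hr]
    · have h1 : out.getD u false = false := by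
        cases hgg : out.getD u false with
        | false => rfl
        | true => exact absurd ((hchar u huN).mp hgg) hr
      have h2 : d u = false := by
        cases hgg : d u with
        | false => rfl
        | true => exact absurd ((hd u).mp hgg) hr
      rw [h1, h2]
  rw [hcount]

-- EA targets are normalised, hence in range
lemma EA_bounds (n : Int) (adj : List (List Int)) (hn : 0 < n) :
    ∀ u v : Int, EA n adj u v → 0 ≤ v ∧ v < n := by
  rintro u v ⟨w, _, hm⟩
  rw [← hm]
  exact ⟨PySem.Int.mod_nonneg _ hn, PySem.Int.mod_lt _ hn⟩

-- TransGen respects a pointwise equivalence of edge relations whose targets stay in range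
lemma transGen_congr (n : Int) (S T : Int → Int → Prop)
    (hST : ∀ u v : Int, 0 ≤ u → u < n → (S u v ↔ T u v))
    (hSb : ∀ u v : Int, S u v → 0 ≤ v ∧ v < n)
    (hTb : ∀ u v : Int, T u v → 0 ≤ v ∧ v < n)
    (i : Int) (h0 : 0 ≤ i) (h1 : i < n) :
    ∀ x, Relation.TransGen S i x ↔ Relation.TransGen T i x := by
  have hSb' : ∀ b, Relation.TransGen S i b → 0 ≤ b ∧ b < n := by
    intro b h
    induction h with
    | single e => exact hSb _ _ e
    | tail _ e _ => exact hSb _ _ e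
  have hTb' : ∀ b, Relation.TransGen T i b → 0 ≤ b ∧ b < n := by
    intro b h
    induction h with
    | single e => exact hTb _ _ e
    | tail _ e _ => exact hTb _ _ e
  intro x
  constructor
  · intro h
    induction h with
    | single e => exact Relation.TransGen.single ((hST _ _ h0 h1).mp e)
    | tail hs e ihh =>
      have hb := hSb' _ hs
      exact Relation.TransGen.tail ihh ((hST _ _ hb.1 hb.2).mp e)
  · intro h
    induction h with
    | single e => exact Relation.TransGen.single ((hST _ _ h0 h1).mpr e)
    | tail hs e ihh =>
      have hb := hTb' _ hs
      exact Relation.TransGen.tail ihh ((hST _ _ hb.1 hb.2).mpr e)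

-- ===== VERDICT (by name: the statement is the Claim_ definition above) =====
theorem solution_spec : Claim_equal_solution := by
  unfold Claim_equal_solution
  intro n results _ hpre
  unfold Spec_solution
  rw [solution_val]
  simp only [solution_alt]
  rw [PySem.List.foldl_prod_mk
    (f := fun g (ab : Int × Int) => adjAppend g (ab.1 - 1) (ab.2 - 1))
    (g := fun g (ab : Int × Int) => adjAppend g (ab.2 - 1) (ab.1 - 1))]
  dsimp only
  set N := n.toNat with hN
  set init := (List.range N).map (fun _ => ([] : List Int)) with hinit
  set wins := results.foldl (fun g (ab : Int × Int) => adjAppend g (ab.1 - 1) (ab.2 - 1)) init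
    with hwins
  set loss := results.foldl (fun g (ab : Int × Int) => adjAppend g (ab.2 - 1) (ab.1 - 1)) init
    with hloss
  set GF := fwAll N (results.foldl (fun g ab => setA g (ab.1 - 1) (ab.2 - 1))
    ((List.range N).map (fun _ => List.replicate N 0))) with hGF
  rw [PySem.List.foldl_ite_add_one (p := fun (i : Nat) =>
    countReach n wins (i : Int) + countReach n loss (i : Int) = n - 1), zero_add]
  congr 1
  apply List.countP_congr
  intro m hm
  have hmN : m < N := List.mem_range.mp hm
  have hn : 0 < n := by omega
  have hinitlen : ((init.length : Nat) : Int) = n := by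
    rw [hinit]; simp; omega
  have hinit_getD : ∀ u : Nat, init.getD u [] = [] := by
    intro u
    by_cases hu : u < N
    · rw [hinit, List.getD_eq_getElem _ _ (by simpa using hu)]
      simp
    · rw [List.getD_eq_getElem?_getD, List.getElem?_eq_none
        (by rw [hinit]; simpa using hu)]
      rfl
  obtain ⟨hwlen, hwmem⟩ := adj_fold n Prod.fst Prod.snd hn results init hinitlen
    (by intro ab hab; have := hpre ab hab; constructor <;> omega)
  obtain ⟨hllen, hlmem⟩ := adj_fold n Prod.snd Prod.fst hn results init hinitlen
    (by intro ab hab; have := hpre ab hab; constructor <;> omega)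
  rw [← hwins] at hwlen hwmem
  rw [← hloss] at hllen hlmem
  have hwent : ∀ u : Nat, ∀ w ∈ wins.getD u [], -n ≤ w ∧ w < n := by
    intro u w hw
    by_cases hu : (u : Int) < n
    · rcases (hwmem u hu w).mp hw with h | ⟨ab, hab, _, h2⟩
      · rw [hinit_getD] at h; exact absurd h (List.not_mem_nil)
      · have := hpre ab hab; omega
    · rw [List.getD_eq_getElem?_getD, List.getElem?_eq_none (by omega)] at hw
      exact absurd hw (List.not_mem_nil)
  have hlent : ∀ u : Nat, ∀ w ∈ loss.getD u [], -n ≤ w ∧ w < n := by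
    intro u w hw
    by_cases hu : (u : Int) < n
    · rcases (hlmem u hu w).mp hw with h | ⟨ab, hab, _, h2⟩
      · rw [hinit_getD] at h; exact absurd h (List.not_mem_nil)
      · have := hpre ab hab; omega
    · rw [List.getD_eq_getElem?_getD, List.getElem?_eq_none (by omega)] at hw
      exact absurd hw (List.not_mem_nil)
  have hwEA : ∀ u v : Int, 0 ≤ u → u < n → (EA n wins u v ↔ Er n results u v) := by
    intro u v h0 h1
    have hcast : ((u.toNat : Nat) : Int) = u := by omega
    constructor
    · rintro ⟨w, hw, hmod⟩
      rcases (hwmem u.toNat (by omega) w).mp hw with h | ⟨ab, hab, e1, e2⟩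
      · rw [hinit_getD] at h; exact absurd h (List.not_mem_nil)
      · exact ⟨ab, hab, by rw [nodeI]; rw [hcast] at e1; exact e1,
          by rw [nodeI, e2]; exact hmod⟩
    · rintro ⟨ab, hab, e1, e2⟩
      refine ⟨ab.2 - 1, ?_, e2⟩
      apply (hwmem u.toNat (by omega) _).mpr
      exact Or.inr ⟨ab, hab, by rw [hcast]; exact e1, rfl⟩
  have hlEA : ∀ u v : Int, 0 ≤ u → u < n → (EA n loss u v ↔ Er n results v u) := by
    intro u v h0 h1
    have hcast : ((u.toNat : Nat) : Int) = u := by omega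
    constructor
    · rintro ⟨w, hw, hmod⟩
      rcases (hlmem u.toNat (by omega) w).mp hw with h | ⟨ab, hab, e1, e2⟩
      · rw [hinit_getD] at h; exact absurd h (List.not_mem_nil)
      · exact ⟨ab, hab, by rw [nodeI, e2]; exact hmod,
          by rw [nodeI]; rw [hcast] at e1; exact e1⟩
    · rintro ⟨ab, hab, e1, e2⟩
      refine ⟨ab.1 - 1, ?_, e1⟩
      apply (hlmem u.toNat (by omega) _).mpr
      exact Or.inr ⟨ab, hab, by rw [hcast]; exact e2, rfl⟩
  have hErb : ∀ u v : Int, Er n results u v → 0 ≤ v ∧ v < n := by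
    intro u v h
    have := Er_bounds hpre h
    omega
  have hErb' : ∀ u v : Int, Er n results v u → 0 ≤ v ∧ v < n := by
    intro u v h
    have := Er_bounds hpre h
    omega
  have hcell := fwAll_cell hpre
  rw [← hN, ← hGF] at hcell
  have hm0 : (0 : Int) ≤ (m : Int) := by omega
  have hm1 : ((m : Nat) : Int) < n := by omega
  have hwT := transGen_congr n (EA n wins) (Er n results) hwEA
    (EA_bounds n wins hn) hErb (m : Int) hm0 hm1
  have hlT := transGen_congr n (EA n loss) (fun u v => Er n results v u) hlEA
    (EA_bounds n loss hn)
    (fun u v h => by have := Er_bounds hpre h; omega) (m : Int) hm0 hm1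
  have hdw : ∀ u : Nat,
      (decide (cellA GF (m : Int) (u : Int) ≠ 0)) = true ↔
        Relation.TransGen (EA n wins) (m : Int) (u : Int) := by
    intro u
    rw [decide_eq_true_eq, hwT ((u : Nat) : Int)]
    exact hcell m u
  have hdl : ∀ u : Nat,
      (decide (cellA GF (u : Int) (m : Int) ≠ 0)) = true ↔
        Relation.TransGen (EA n loss) (m : Int) (u : Int) := by
    intro u
    rw [decide_eq_true_eq, hlT ((u : Nat) : Int)]
    rw [show (Relation.TransGen (fun u v => Er n results v u) (m : Int) (u : Int)) =
      (Relation.TransGen (Function.swap (Er n results)) (m : Int) (u : Int)) from rfl,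
      Relation.transGen_swap]
    exact hcell u m
  have h1 := countReach_spec n wins hn hwlen hwent m hm1
    (fun u => decide (cellA GF (m : Int) (u : Int) ≠ 0)) hdw
  have h2 := countReach_spec n loss hn hllen hlent m hm1
    (fun u => decide (cellA GF (u : Int) (m : Int) ≠ 0)) hdl
  have key : ((List.range N).map (wgt GF m)).sum =
      countReach n wins (m : Int) + countReach n loss (m : Int) := by
    rw [wgt_sum, h1, h2, ← hN]
  simp only [beq_iff_eq, decide_eq_true_eq]
  rw [key]
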